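-- pv_equiv track=rewrite | github.com/jarednielsen/advent-of-code | dec06.py | questions2
-- ===== SOURCE A (Python) =====
-- def questions2(group):
--     lines = group.split("\n")
--     chars_intersection = None
--     for line in lines:
--         if chars_intersection is None:
--             chars_intersection = set(line)
--         else:
--             chars_intersection = chars_intersection.intersection(set(line))
--     return len(chars_intersection)
-- ===== SOURCE B (Python) =====
-- def questions2(group):
--     lines = group.split("\n")
--     n = len(lines)
--     counts = {}
--     for line in lines:
--         for ch in set(line):
--             counts[ch] = counts.get(ch, 0) + 1
--     return sum(1 for v in counts.values() if v == n)
-- ===== Notes on version B (the rewrite author's own statement) =====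
-- stated objective: alternative
-- what changed: Replaces the running set-intersection fold with a single tally: count each line's distinct characters in a dict and return how many characters reach a count equal to the number of lines.
import Mathlib
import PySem

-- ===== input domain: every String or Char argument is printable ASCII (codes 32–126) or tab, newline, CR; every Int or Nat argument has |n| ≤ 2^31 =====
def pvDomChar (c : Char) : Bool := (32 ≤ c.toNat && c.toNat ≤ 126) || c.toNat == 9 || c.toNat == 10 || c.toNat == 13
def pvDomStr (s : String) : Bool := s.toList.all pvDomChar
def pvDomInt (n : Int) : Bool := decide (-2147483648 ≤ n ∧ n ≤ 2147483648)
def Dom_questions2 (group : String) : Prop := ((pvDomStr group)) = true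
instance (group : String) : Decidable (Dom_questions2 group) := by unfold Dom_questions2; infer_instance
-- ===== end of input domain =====

-- B replaces A's running set-intersection with a per-line distinct-character tally and a
-- threshold count (same cost, different algorithm).

-- ===== PORT A =====
-- A: intersect the character sets of the lines, return the size of the intersection.
def questions2 (group : String) : Int :=
  match PySem.Str.split? group "\n" with
  | none => 0        -- unreachable: the separator "\n" is nonempty
  | some lines =>
    match lines.foldl (fun acc line =>
        match acc with
        | none => some (PySem.Set.ofList line.toList)
        | some s => some (PySem.Set.inter s (PySem.Set.ofList line.toList))) none with
    | some s => PySem.Set.len s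
    | none => 0      -- unreachable: split always yields at least one piece (len(None) would raise)

-- ===== PORT B =====
-- B: tally each line's distinct characters, count characters whose tally equals the line count.
def questions2_alt (group : String) : Int :=
  match PySem.Str.split? group "\n" with
  | none => 0        -- unreachable: the separator "\n" is nonempty
  | some lines =>
    let n : Int := (lines.length : Int)
    let counts : PySem.Dict Char Int := lines.foldl (fun d line =>
        (PySem.Set.ofList line.toList).foldl (fun d c => d.modify c 0 (· + 1)) d)
      PySem.Dict.empty
    ((counts.values.filter (fun v => v == n)).length : Int)

-- ===== PRECONDITION & SPEC =====
def Spec_questions2 (group : String) (out : Int) : Prop := out = questions2_alt group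
instance (group : String) (out : Int) : Decidable (Spec_questions2 group out) := by unfold Spec_questions2; infer_instance

-- ===== CLAIM (what is proved, stated in full; the proofs are below) =====
def Claim_equal_questions2 : Prop := ∀ (group : String), Dom_questions2 group → Spec_questions2 group (questions2 group)

-- ===== LEMMAS AND PROOFS =====

-- The nested tally loop of B is the counter of the concatenation of the per-line distinct-char lists.
theorem tally_eq_counter (ls : List (List Char)) (d : PySem.Dict Char Int) :
    ls.foldl (fun d l => l.foldl (fun d c => d.modify c 0 (· + 1)) d) d
      = (ls.flatten).foldl (fun d c => d.modify c 0 (· + 1)) d := by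
  induction ls generalizing d with
  | nil => rfl
  | cons l t ih => simp [List.foldl_append, ih]

-- A's intersection fold over the tail is a single filter by membership in every line.
theorem inter_foldl_eq_filter (rest : List (List Char)) (s : List Char) :
    rest.foldl (fun s l => PySem.Set.inter s (PySem.Set.ofList l)) s
      = s.filter (fun c => rest.all (fun l => (PySem.Set.ofList l).contains c)) := by
  induction rest generalizing s with
  | nil => simp
  | cons l t ih =>
      rw [List.foldl_cons, ih]
      simp only [PySem.Set.inter, List.filter_filter, List.all_cons]
      apply List.filter_congr
      intro c _
      simp [Bool.and_comm]

-- counting an element in a flattened list of nodup lists = number of lists containing it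
theorem count_flatten_nodup (c : Char) (ls : List (List Char)) (h : ∀ l ∈ ls, l.Nodup) :
    (ls.flatten).count c = ls.countP (fun l => l.contains c) := by
  induction ls with
  | nil => rfl
  | cons l t ih =>
      simp only [List.flatten_cons, List.count_append, List.countP_cons]
      rw [ih (fun l hl => h l (List.mem_cons_of_mem _ hl))]
      by_cases hc : c ∈ l
      · rw [List.count_eq_one_of_mem (h l (List.mem_cons_self)) hc]
        simp [hc]
        omega
      · rw [List.count_eq_zero_of_not_mem hc]
        simp [hc]

-- Core equality, for an arbitrary list of lines (covers the empty list trivially).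
theorem core_eq (lines : List String) :
    (match lines.foldl (fun acc line =>
        match acc with
        | none => some (PySem.Set.ofList line.toList)
        | some s => some (PySem.Set.inter s (PySem.Set.ofList line.toList))) none with
     | some s => PySem.Set.len s
     | none => (0 : Int))
    = (((lines.foldl (fun d line =>
          (PySem.Set.ofList line.toList).foldl (fun d c => d.modify c 0 (· + 1)) d)
          PySem.Dict.empty).values.filter (fun v => v == (lines.length : Int))).length : Int) := by
  -- rewrite B's side into a countP over the deduplicated character pool
  have hB : ((lines.foldl (fun d line =>
          (PySem.Set.ofList line.toList).foldl (fun d c => d.modify c 0 (· + 1)) d)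
          PySem.Dict.empty).values.filter (fun v => v == (lines.length : Int))).length
      = ((PySem.Set.ofList ((lines.map (fun l => PySem.Set.ofList l.toList)).flatten)).filter
          (fun c => ((((lines.map (fun l => PySem.Set.ofList l.toList)).flatten).count c : Int)
              == (lines.length : Int)))).length := by
    have h1 : lines.foldl (fun d line =>
          (PySem.Set.ofList line.toList).foldl (fun d c => d.modify c 0 (· + 1)) d)
          PySem.Dict.empty
        = PySem.Dict.counter ((lines.map (fun l => PySem.Set.ofList l.toList)).flatten) := by
      rw [PySem.Dict.counter_eq_foldl, ← tally_eq_counter, List.foldl_map]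
    rw [h1, PySem.Dict.values, PySem.Dict.items_counter, List.map_map,
        ← List.countP_eq_length_filter, ← List.countP_eq_length_filter, List.countP_map]
    rfl
  rw [hB]
  cases lines with
  | nil => rfl
  | cons l0 rest =>
      -- A's fold: peel the first line, then the intersection fold
      have hfold : ∀ (t : List String) (s : PySem.Set Char),
          t.foldl (fun acc line =>
            match acc with
            | none => some (PySem.Set.ofList line.toList)
            | some s => some (PySem.Set.inter s (PySem.Set.ofList line.toList))) (some s)
          = some (t.foldl (fun s line => PySem.Set.inter s (PySem.Set.ofList line.toList)) s) := by
        intro t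
        induction t with
        | nil => intro s; rfl
        | cons x xs ih => intro s; simp [ih]
      simp only [List.foldl_cons, hfold]
      have hfold2 := inter_foldl_eq_filter (rest.map (fun l => l.toList)) (PySem.Set.ofList l0.toList)
      have : rest.foldl (fun s line => PySem.Set.inter s (PySem.Set.ofList line.toList))
            (PySem.Set.ofList l0.toList)
          = (rest.map (fun l => l.toList)).foldl (fun s l => PySem.Set.inter s (PySem.Set.ofList l))
            (PySem.Set.ofList l0.toList) := by
        rw [List.foldl_map]
      rw [PySem.Set.len, this, hfold2]
      -- both sides are lengths of nodup lists with the same membership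
      congr 1
      apply List.Perm.length_eq
      have hnodA : ((PySem.Set.ofList l0.toList).filter
          (fun c => (rest.map (fun l => l.toList)).all (fun l => (PySem.Set.ofList l).contains c))).Nodup :=
        (PySem.Set.nodup_ofList _).filter _
      have hnodB : ((PySem.Set.ofList (((l0 :: rest).map (fun l => PySem.Set.ofList l.toList)).flatten)).filter
          (fun c => ((((l0 :: rest).map (fun l => PySem.Set.ofList l.toList)).flatten).count c : Int)
              == ((l0 :: rest).length : Int))).Nodup :=
        (PySem.Set.nodup_ofList _).filter _
      rw [List.perm_ext_iff_of_nodup hnodA hnodB]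
      intro c
      have hnd : ∀ l ∈ (l0 :: rest).map (fun l => PySem.Set.ofList l.toList), l.Nodup := by
        intro l hl
        rcases List.mem_map.mp hl with ⟨x, _, rfl⟩
        exact PySem.Set.nodup_ofList _
      have hcount := count_flatten_nodup c _ hnd
      constructor
      · intro hc
        rcases List.mem_filter.mp hc with ⟨hmem, hall⟩
        have hmem0 : c ∈ l0.toList := (PySem.Set.mem_ofList _ _).mp hmem
        have hallP : ∀ l ∈ (l0 :: rest).map (fun l => PySem.Set.ofList l.toList), l.contains c = true := by
          intro l hl
          rcases List.mem_map.mp hl with ⟨x, hx, rfl⟩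
          rcases List.mem_cons.mp hx with h0 | hr
          · subst h0
            simpa [PySem.Set.mem_ofList] using hmem0
          · have := List.all_eq_true.mp hall x.toList (List.mem_map.mpr ⟨x, hr, rfl⟩)
            simpa using this
        refine List.mem_filter.mpr ⟨?_, ?_⟩
        · exact (PySem.Set.mem_ofList _ _).mpr
            (List.mem_flatten.mpr ⟨PySem.Set.ofList l0.toList,
              List.mem_map.mpr ⟨l0, List.mem_cons_self, rfl⟩,
              (PySem.Set.mem_ofList _ _).mpr hmem0⟩)
        · have hCP : ((l0 :: rest).map (fun l => PySem.Set.ofList l.toList)).countP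
              (fun l => l.contains c) = ((l0 :: rest).map (fun l => PySem.Set.ofList l.toList)).length :=
            List.countP_eq_length.mpr hallP
          have hce : List.count c (((l0 :: rest).map (fun l => PySem.Set.ofList l.toList)).flatten)
              = (l0 :: rest).length := by
            exact hcount.trans (hCP.trans (by simp))
          simp only [hce, beq_self_eq_true]
      · intro hc
        rcases List.mem_filter.mp hc with ⟨hmem, hcnt⟩
        have hcnt' : ((((l0 :: rest).map (fun l => PySem.Set.ofList l.toList)).flatten).count c : Int)
            = ((l0 :: rest).length : Int) := eq_of_beq hcnt
        have hcntN : (((l0 :: rest).map (fun l => PySem.Set.ofList l.toList)).flatten).count c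
            = (l0 :: rest).length := by exact_mod_cast hcnt'
        have hallP : ∀ l ∈ (l0 :: rest).map (fun l => PySem.Set.ofList l.toList), l.contains c = true := by
          refine List.countP_eq_length.mp ?_
          have h2 := hcount.symm.trans hcntN
          simpa [List.length_map] using h2
        have hmem0 : c ∈ l0.toList := by
          have := hallP (PySem.Set.ofList l0.toList) (List.mem_map.mpr ⟨l0, List.mem_cons_self, rfl⟩)
          simpa [PySem.Set.mem_ofList] using this
        refine List.mem_filter.mpr ⟨(PySem.Set.mem_ofList _ _).mpr hmem0, ?_⟩
        simp only [List.all_eq_true]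
        intro l hl
        rcases List.mem_map.mp hl with ⟨x, hx, rfl⟩
        exact hallP (PySem.Set.ofList x.toList)
          (List.mem_map.mpr ⟨x, List.mem_cons_of_mem _ hx, rfl⟩)

-- ===== VERDICT (by name: the statement is the Claim_ definition above) =====
theorem questions2_spec : Claim_equal_questions2 := by
  intro group _
  unfold Spec_questions2 questions2 questions2_alt
  cases PySem.Str.split? group "\n" with
  | none => rfl
  | some lines => simpa using core_eq lines
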